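-- pv_equiv track=rewrite | github.com/crazywifi/copy_paste | a.py | format_search_query
-- ===== SOURCE A (Python) =====
-- def format_search_query(query):
--     """Format search query with appropriate operators"""
--     words = query.split()
--     operators = {"AND", "OR", "NOT"}
--     formatted_query = []
--     temp_phrase = []
--
--     for word in words:
--         if word.upper() in operators:
--             if temp_phrase:
--                 formatted_query.append(f'"{" ".join(temp_phrase)}"')
--                 temp_phrase = []
--             formatted_query.append(word)
--         else:
--             temp_phrase.append(word)
--
--     if temp_phrase:
--         formatted_query.append(f'"{" ".join(temp_phrase)}"')
--
--     final_query = " ".join(formatted_query)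
--
--     # If no logical operators, wrap entire query in quotes
--     if not any(op in final_query for op in operators) and " " in final_query:
--         if not (final_query.startswith('"') and final_query.endswith('"')):
--             final_query = f'"{final_query}"'
--
--     return final_query
-- ===== SOURCE B (Python) =====
-- def format_search_query(query):
--     """Format search query with appropriate operators"""
--     OPS = {"AND", "OR", "NOT"}
--     words = query.split()
--     tokens = []
--     i, n = 0, len(words)
--     while i < n:
--         if words[i].upper() in OPS:
--             tokens.append(words[i])
--             i += 1
--         else:
--             j = i
--             while j < n and words[j].upper() not in OPS:
--                 j += 1
--             tokens.append('"' + " ".join(words[i:j]) + '"')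
--             i = j
--     final_query = " ".join(tokens)
--     if not any(op in final_query for op in OPS) and " " in final_query:
--         if not (final_query.startswith('"') and final_query.endswith('"')):
--             final_query = '"' + final_query + '"'
--     return final_query
-- ===== Notes on version B (the rewrite author's own statement) =====
-- stated objective: alternative
-- what changed: Replaces A's accumulator loop carrying a pending temp_phrase list with a run-based scan that consumes each maximal run of non-operator words in one step (inner scan to the next operator) and emits its quoted form directly; the verbatim post-processing is kept.
import Mathlib
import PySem

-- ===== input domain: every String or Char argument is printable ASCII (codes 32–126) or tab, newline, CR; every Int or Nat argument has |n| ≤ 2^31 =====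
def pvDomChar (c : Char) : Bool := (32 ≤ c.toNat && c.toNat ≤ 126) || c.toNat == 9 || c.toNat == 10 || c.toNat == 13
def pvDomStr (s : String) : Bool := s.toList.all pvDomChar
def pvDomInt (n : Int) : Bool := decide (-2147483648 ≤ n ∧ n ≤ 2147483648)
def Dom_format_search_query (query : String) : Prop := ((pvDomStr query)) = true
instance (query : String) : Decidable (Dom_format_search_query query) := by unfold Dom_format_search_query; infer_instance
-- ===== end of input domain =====

-- B replaces A's pending-phrase accumulator loop by a run-based scan (consume each maximal
-- non-operator run in one step); same value everywhere, objective: alternative decomposition.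

-- shared helpers: both Pythons contain these identical expressions/lines verbatim
def pvIsOp (w : String) : Bool :=
  PySem.Set.contains (PySem.Set.ofList ["AND", "OR", "NOT"]) (PySem.Str.upper w)

def pvQuote (s : String) : String := "\"" ++ s ++ "\""

-- the final post-processing block, identical in A and B
def pvPost (final : String) : String :=
  if (!(["AND", "OR", "NOT"].any fun op => PySem.Str.isIn op final)) &&
      PySem.Str.isIn " " final then
    if !(PySem.Str.startswith final "\"" && PySem.Str.endswith final "\"") then
      pvQuote final
    else final
  else final

-- ===== PORT A =====
-- the body of A's for-loop over words, state = (formatted_query, temp_phrase)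
def aStep (st : List String × List String) (word : String) : List String × List String :=
  if pvIsOp word then
    ((if st.2.isEmpty then st.1 else st.1 ++ [pvQuote (PySem.Str.join " " st.2)]) ++ [word], [])
  else
    (st.1, st.2 ++ [word])

-- the trailing 'if temp_phrase: formatted_query.append(…)'
def aFlush (st : List String × List String) : List String :=
  if st.2.isEmpty then st.1 else st.1 ++ [pvQuote (PySem.Str.join " " st.2)]

def format_search_query (query : String) : String :=
  let words := PySem.Str.split₀ query
  pvPost (PySem.Str.join " " (aFlush (words.foldl aStep ([], []))))

-- ===== PORT B =====
-- run-based tokenizer: an operator word is its own token; a maximal run of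
-- non-operator words becomes one quoted token
def bTokens : List String → List String
  | [] => []
  | w :: rest =>
    if pvIsOp w = true then
      w :: bTokens rest
    else
      pvQuote (PySem.Str.join " " (List.takeWhile (fun x => !pvIsOp x) (w :: rest))) ::
        bTokens (List.dropWhile (fun x => !pvIsOp x) (w :: rest))
termination_by ws => ws.length
decreasing_by
  · simp
  · simp [List.dropWhile, *]
    exact List.length_dropWhile_le _ _

def format_search_query_alt (query : String) : String :=
  pvPost (PySem.Str.join " " (bTokens (PySem.Str.split₀ query)))

-- ===== PRECONDITION & SPEC =====
def Spec_format_search_query (query : String) (out : String) : Prop := out = format_search_query_alt query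
instance (query : String) (out : String) : Decidable (Spec_format_search_query query out) := by unfold Spec_format_search_query; infer_instance

-- ===== CLAIM (what is proved, stated in full; the proofs are below) =====
def Claim_equal_format_search_query : Prop := ∀ (query : String), Dom_format_search_query query → Spec_format_search_query query (format_search_query query)

-- ===== LEMMAS AND PROOFS =====

theorem takeWhile_all_append {α : Type} (p : α → Bool) (l1 l2 : List α)
    (h1 : ∀ x ∈ l1, p x = true) :
    List.takeWhile p (l1 ++ l2) = l1 ++ List.takeWhile p l2 ∧
    List.dropWhile p (l1 ++ l2) = List.dropWhile p l2 := by
  induction l1 with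
  | nil => simp
  | cons a l ih =>
    have ha : p a = true := h1 a (by simp)
    have := ih (fun x hx => h1 x (by simp [hx]))
    simp [ha, this.1, this.2]

theorem bTokens_all_nonop (ts : List String) (hne : ts ≠ [])
    (h : ∀ x ∈ ts, pvIsOp x = false) :
    bTokens ts = [pvQuote (PySem.Str.join " " ts)] := by
  obtain ⟨w, rest, rfl⟩ := List.exists_cons_of_ne_nil hne
  have hw : pvIsOp w = false := h w (by simp)
  have hpair := takeWhile_all_append (fun x => !pvIsOp x) (w :: rest) []
    (by intro x hx; simp [h x hx])
  have htk : List.takeWhile (fun x => !pvIsOp x) (w :: rest) = w :: rest := by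
    simpa using hpair.1
  have hdp : List.dropWhile (fun x => !pvIsOp x) (w :: rest) = [] := by
    simpa using hpair.2
  rw [bTokens]
  simp [hw, htk, hdp, bTokens]

theorem aLoop_eq_bTokens (ws : List String) (fq temp : List String)
    (h : ∀ x ∈ temp, pvIsOp x = false) :
    aFlush (ws.foldl aStep (fq, temp)) = fq ++ bTokens (temp ++ ws) := by
  induction ws generalizing fq temp with
  | nil =>
    simp only [List.foldl_nil, List.append_nil, aFlush]
    cases temp with
    | nil => simp [bTokens]
    | cons t ts =>
      rw [bTokens_all_nonop (t :: ts) (by simp) h]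
      simp
  | cons w rest ih =>
    simp only [List.foldl_cons]
    by_cases hw : pvIsOp w = true
    · have step : aStep (fq, temp) w =
          ((if temp.isEmpty then fq else fq ++ [pvQuote (PySem.Str.join " " temp)]) ++ [w], []) := by
        simp [aStep, hw]
      rw [step, ih _ _ (by intro x hx; simp at hx)]
      cases temp with
      | nil =>
        simp [bTokens, hw]
      | cons t ts =>
        have ht : pvIsOp t = false := h t (by simp)
        have hpair := takeWhile_all_append (fun x => !pvIsOp x) (t :: ts) (w :: rest)
          (by intro x hx; simp [h x hx])
        rw [show ((t :: ts) ++ w :: rest) = t :: (ts ++ w :: rest) by simp]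
        rw [bTokens]
        simp only [ht, Bool.false_eq_true, if_false]
        rw [show (t :: (ts ++ w :: rest)) = ((t :: ts) ++ w :: rest) by simp] at *
        rw [hpair.1, hpair.2]
        rw [show List.takeWhile (fun x => !pvIsOp x) (w :: rest) = [] by
          simp [List.takeWhile, hw]]
        rw [show List.dropWhile (fun x => !pvIsOp x) (w :: rest) = w :: rest by
          simp [List.dropWhile, hw]]
        rw [bTokens]
        simp [hw]
    · have hw' : pvIsOp w = false := by simpa using hw
      have step : aStep (fq, temp) w = (fq, temp ++ [w]) := by simp [aStep, hw']
      rw [step, ih fq (temp ++ [w])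
        (by intro x hx; rcases List.mem_append.mp hx with h1 | h1
            · exact h x h1
            · simp at h1; simpa [h1] using hw')]
      simp

-- ===== VERDICT (by name: the statement is the Claim_ definition above) =====
theorem format_search_query_spec : Claim_equal_format_search_query := by
  intro query _
  have h := aLoop_eq_bTokens (PySem.Str.split₀ query) [] [] (by intro x hx; simp at hx)
  simp only [List.nil_append] at h
  unfold Spec_format_search_query
  simp [format_search_query, format_search_query_alt, h]
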